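-- pv_equiv track=rewrite | github.com/FerreiraNuno/Advent-of-Code | Day7.py | part1
-- ===== SOURCE A (Python) =====
-- def part1(searched_bag, rules):
--     already_searched_bags = []
--     def checkContainCount(searched_bag, rules, already_searched_bags):
--         count = 0
--         for rule in rules:
--             for key, value in rule.items():
--                 for value in rule.get(key):
--                     if value == searched_bag:
--                         if not key in already_searched_bags:
--                             count += 1
--                             count += checkContainCount(key, rules, already_searched_bags)
--         already_searched_bags.append(searched_bag)
--         return count
--     return checkContainCount(searched_bag, rules, already_searched_bags)
-- ===== SOURCE B (Python) =====
-- def part1(searched_bag, rules):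
--     parents = {}
--     for rule in rules:
--         for key, vals in rule.items():
--             for v in vals:
--                 parents.setdefault(v, []).append(key)
--     seen = set()
--     stack = [searched_bag]
--     while stack:
--         b = stack.pop()
--         for p in parents.get(b, []):
--             if p not in seen:
--                 seen.add(p)
--                 stack.append(p)
--     return len(seen)
-- ===== Notes on version B (the rewrite author's own statement) =====
-- stated objective: alternative
-- what changed: Replaced the recursive search that rescans every rule for each visited bag (with a shared visited list) by a reverse-adjacency dict built in one pass over the rules plus an iterative worklist that collects the distinct ancestor bags and returns the size of the visited set.
import Mathlib
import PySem

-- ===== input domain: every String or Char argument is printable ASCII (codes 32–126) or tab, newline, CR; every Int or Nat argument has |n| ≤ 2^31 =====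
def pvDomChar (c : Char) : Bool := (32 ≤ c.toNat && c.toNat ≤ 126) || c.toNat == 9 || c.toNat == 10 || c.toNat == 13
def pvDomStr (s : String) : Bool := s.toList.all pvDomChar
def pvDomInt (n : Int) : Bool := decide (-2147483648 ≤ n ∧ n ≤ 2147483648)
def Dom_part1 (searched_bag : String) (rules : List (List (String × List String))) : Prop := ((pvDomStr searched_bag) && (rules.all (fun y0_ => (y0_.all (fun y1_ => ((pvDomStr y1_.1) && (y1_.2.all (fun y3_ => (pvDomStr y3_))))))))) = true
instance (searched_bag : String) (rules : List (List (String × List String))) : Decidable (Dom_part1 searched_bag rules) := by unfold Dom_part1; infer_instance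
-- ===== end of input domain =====

-- B replaces A's recursive DFS that rescans every rule per visited bag (with a shared visited
-- list) by a reverse-adjacency index built once plus an iterative worklist over a visited set
-- (objective: alternative). A mutates only its local helper list; the claim is about the return value.

-- shared helper: the (container, contained) edge list, through Python-dict semantics (used by both ports' fuel and by Pre_)
def pvEdgesD (rulesD : List (PySem.Dict String (List String))) : List (String × String) :=
  rulesD.flatMap (fun d => d.items.flatMap (fun kv => kv.2.map (fun v => (kv.1, v))))

def pvEdges (rules : List (List (String × List String))) : List (String × String) :=
  pvEdgesD (rules.map PySem.Dict.ofList)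

-- ===== PORT A =====
-- literal port of checkContainCount; the Nat fuel only makes the recursion total:
-- inside Pre_part1 it is never exhausted (Python raises RecursionError on reachable cycles)
def pvCheckA (rulesD : List (PySem.Dict String (List String))) : Nat → String → List String → Int × List String
  | 0, _, al => (0, al)
  | n+1, b, al =>
    let st := rulesD.foldl (fun st rule =>
      rule.items.foldl (fun st kv =>
        ((rule.get? kv.1).getD []).foldl (fun (st : Int × List String) v =>
          if v = b then
            (if kv.1 ∈ st.2 then st
             else
               let r := pvCheckA rulesD n kv.1 st.2
               (st.1 + 1 + r.1, r.2))
          else st) st) st) ((0 : Int), al)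
    (st.1, st.2 ++ [b])

def part1 (searched_bag : String) (rules : List (List (String × List String))) : Int :=
  (pvCheckA (rules.map PySem.Dict.ofList) ((pvEdges rules).length + 2) searched_bag []).1

-- ===== PORT B =====
def pvBuildParents (rulesD : List (PySem.Dict String (List String))) : PySem.Dict String (List String) :=
  rulesD.foldl (fun d rule =>
    rule.items.foldl (fun d kv =>
      kv.2.foldl (fun d v => d.modify v [] (fun l => l ++ [kv.1])) d) d) PySem.Dict.empty

-- the while loop; fuel only bounds the iteration count (pops ≤ pushes ≤ 1 + #edges)
def pvLoopB (parents : PySem.Dict String (List String)) : Nat → PySem.Set String → List String → PySem.Set String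
  | 0, seen, _ => seen
  | n+1, seen, stack =>
    match PySem.List.pop? stack (-1) with
    | none => seen
    | some (b, rest) =>
      let st := (parents.getD b []).foldl (fun (st : PySem.Set String × List String) p =>
        if p ∈ st.1 then st else (PySem.Set.add st.1 p, st.2 ++ [p])) (seen, rest)
      pvLoopB parents n st.1 st.2

def part1_alt (searched_bag : String) (rules : List (List (String × List String))) : Int :=
  let parents := pvBuildParents (rules.map PySem.Dict.ofList)
  ((pvLoopB parents ((pvEdges rules).length + 1) PySem.Set.empty [searched_bag]).length : Int)

-- ===== PRECONDITION & SPEC =====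
-- reachability helpers for Pre_ (bounded closure of the "is contained in some bag" step — a plain graph property)
def pvParents (E : List (String × String)) (x : String) : List String :=
  E.filterMap (fun kv => if kv.2 = x then some kv.1 else none)

def pvGrow (E : List (String × String)) (S : List String) : List String :=
  PySem.Set.update S (S.flatMap (pvParents E))

def pvClosure (E : List (String × String)) (S : List String) : List String :=
  (pvGrow E)^[E.length + 1] (PySem.Set.ofList S)

-- Pre_ excludes exactly the inputs where some bag reachable from searched_bag (by repeatedly taking containers)
-- lies on a containment cycle: there Python A recurses forever (RecursionError), so A returns on no such input.
def Pre_part1 (searched_bag : String) (rules : List (List (String × List String))) : Prop :=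
  ∀ x ∈ pvClosure (pvEdges rules) [searched_bag],
    x ∉ pvClosure (pvEdges rules) (pvParents (pvEdges rules) x)

instance (searched_bag : String) (rules : List (List (String × List String))) : Decidable (Pre_part1 searched_bag rules) := by
  unfold Pre_part1; infer_instance

def pvWitness_part1 : String × (List (List (String × List String))) :=
  ("shiny gold", [[("bright white", ["shiny gold"]), ("muted yellow", ["shiny gold", "faded blue"])],
                  [("light red", ["bright white", "muted yellow"])]])

def Spec_part1 (searched_bag : String) (rules : List (List (String × List String))) (out : Int) : Prop := out = part1_alt searched_bag rules
instance (searched_bag : String) (rules : List (List (String × List String))) (out : Int) : Decidable (Spec_part1 searched_bag rules out) := by unfold Spec_part1; infer_instance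

-- ===== CLAIM (what is proved, stated in full; the proofs are below) =====
def Claim_equal_part1 : Prop := ∀ (searched_bag : String) (rules : List (List (String × List String))), Dom_part1 searched_bag rules → Pre_part1 searched_bag rules → Spec_part1 searched_bag rules (part1 searched_bag rules)

-- ===== LEMMAS AND PROOFS =====

-- one step of containment: pvStepR E x y ↔ some rule says bag y directly contains bag x
def pvStepR (E : List (String × String)) (x y : String) : Prop := (y, x) ∈ E

-- reachability avoiding a visited list (after the start, every node is fresh)
def pvAR (E : List (String × String)) (al : List String) : String → String → Prop :=
  Relation.ReflTransGen (fun u v => pvStepR E u v ∧ v ∉ al)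

def pvNoCyc (E : List (String × String)) (al : List String) (b : String) : Prop :=
  ∀ x, pvAR E al b x → ∀ p, (pvStepR E x p ∧ p ∉ al) → ¬ pvAR E al p x

def pvRegion (E : List (String × String)) (al : List String) (b : String) : Set String :=
  {x | pvAR E al b x}

-- the flattened step of A's triple loop
def pvStepA (rulesD : List (PySem.Dict String (List String))) (n : Nat) (b : String)
    (st : Int × List String) (kv : String × String) : Int × List String :=
  if kv.2 = b then
    (if kv.1 ∈ st.2 then st
     else
       let r := pvCheckA rulesD n kv.1 st.2
       (st.1 + 1 + r.1, r.2))
  else st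

lemma pvFoldItemsFlat {α : Type} (l : List (String × List String)) (f : α → String × String → α) (a : α) :
    l.foldl (fun a kv => kv.2.foldl (fun a v => f a (kv.1, v)) a) a
      = (l.flatMap (fun kv => kv.2.map (fun v => (kv.1, v)))).foldl f a := by
  induction l generalizing a with
  | nil => rfl
  | cons kv rest ih => simp [List.flatMap_cons, List.foldl_append, List.foldl_map, ih]

lemma pvFoldRulesFlat {α : Type} (rulesD : List (PySem.Dict String (List String)))
    (f : α → String × String → α) (a : α) :
    rulesD.foldl (fun a d => (d.items.flatMap (fun kv => kv.2.map (fun v => (kv.1, v)))).foldl f a) a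
      = (pvEdgesD rulesD).foldl f a := by
  induction rulesD generalizing a with
  | nil => rfl
  | cons d rest ih => simp [pvEdgesD, List.flatMap_cons, List.foldl_append, ih]
  
lemma pvDictFoldEq {α : Type} (d : PySem.Dict String (List String)) (hd : d.keys.Nodup)
    (f : α → String × String → α) (a : α) :
    d.items.foldl (fun a kv => ((d.get? kv.1).getD []).foldl (fun a v => f a (kv.1, v)) a) a
      = (d.items.flatMap (fun kv => kv.2.map (fun v => (kv.1, v)))).foldl f a := by
  rw [← pvFoldItemsFlat]
  apply PySem.List.foldl_congr_mem
  intro acc kv hkv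
  have : d.get? kv.1 = some kv.2 := PySem.Dict.get?_of_mem_items d (by simpa using hkv) hd
  rw [this]
  rfl

lemma pvCheckA_succ (rulesD : List (PySem.Dict String (List String)))
    (hk : ∀ d ∈ rulesD, (PySem.Dict.keys d).Nodup) (n : Nat) (b : String) (al : List String) :
    pvCheckA rulesD (n+1) b al =
      (((pvEdgesD rulesD).foldl (pvStepA rulesD n b) ((0 : Int), al)).1,
       ((pvEdgesD rulesD).foldl (pvStepA rulesD n b) ((0 : Int), al)).2 ++ [b]) := by
  have h0 : pvCheckA rulesD (n+1) b al =
      ((rulesD.foldl (fun st rule =>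
          rule.items.foldl (fun st kv =>
            ((rule.get? kv.1).getD []).foldl (fun st v => pvStepA rulesD n b st (kv.1, v)) st) st)
          ((0 : Int), al)).1,
       (rulesD.foldl (fun st rule =>
          rule.items.foldl (fun st kv =>
            ((rule.get? kv.1).getD []).foldl (fun st v => pvStepA rulesD n b st (kv.1, v)) st) st)
          ((0 : Int), al)).2 ++ [b]) := rfl
  have hF : rulesD.foldl (fun st rule =>
        rule.items.foldl (fun st kv =>
          ((rule.get? kv.1).getD []).foldl (fun st v => pvStepA rulesD n b st (kv.1, v)) st) st)
        ((0 : Int), al) = (pvEdgesD rulesD).foldl (pvStepA rulesD n b) ((0 : Int), al) := by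
    rw [PySem.List.foldl_congr_mem rulesD _
      (fun a d => (d.items.flatMap (fun kv => kv.2.map (fun v => (kv.1, v)))).foldl (pvStepA rulesD n b) a)
      _ (fun acc d hd => pvDictFoldEq d (hk d hd) _ acc)]
    exact pvFoldRulesFlat rulesD (pvStepA rulesD n b) ((0 : Int), al)
  rw [h0, hF]

lemma pvAR_mono {E : List (String × String)} {al al' : List String} (h : ∀ a ∈ al, a ∈ al')
    {u x : String} (hx : pvAR E al' u x) : pvAR E al u x :=
  Relation.ReflTransGen.mono (fun _ v hv => ⟨hv.1, fun hin => hv.2 (h v hin)⟩) hx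

lemma pvAR_split {E : List (String × String)} {al al' : List String} (h : ∀ a ∈ al, a ∈ al')
    {u x : String} (hx : pvAR E al u x) :
    pvAR E al' u x ∨ ∃ y, y ∈ al' ∧ y ∉ al ∧ pvAR E al u y ∧ pvAR E al y x := by
  induction hx using Relation.ReflTransGen.head_induction_on with
  | refl => exact Or.inl .refl
  | @head a c h' hrest ih =>
    rcases ih with hgood | ⟨y, hy1, hy2, hy3, hy4⟩
    · by_cases hc : c ∈ al'
      · exact Or.inr ⟨c, hc, h'.2, Relation.ReflTransGen.single h', pvAR_mono h hgood⟩
      · exact Or.inl (Relation.ReflTransGen.head ⟨h'.1, hc⟩ hgood)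
    · exact Or.inr ⟨y, hy1, hy2, Relation.ReflTransGen.head h' hy3, hy4⟩

lemma pvRegion_subset (E : List (String × String)) (al : List String) (b : String) :
    pvRegion E al b ⊆ insert b {x | x ∈ E.map Prod.fst} := by
  intro x hx
  rcases Relation.ReflTransGen.cases_tail hx with h | ⟨c, _, hstep⟩
  · exact Or.inl h
  · exact Or.inr (List.mem_map.mpr ⟨(x, c), hstep.1, rfl⟩)

lemma pvRegion_finite (E : List (String × String)) (al : List String) (b : String) :
    (pvRegion E al b).Finite :=
  Set.Finite.subset (Set.Finite.insert b (List.finite_toSet (E.map Prod.fst)))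
    (pvRegion_subset E al b)

lemma pvRegion_ncard_le (E : List (String × String)) (al : List String) (b : String) :
    (pvRegion E al b).ncard ≤ E.length + 1 := by
  have h1 := Set.ncard_le_ncard (pvRegion_subset E al b)
    (Set.Finite.insert b (List.finite_toSet (E.map Prod.fst)))
  have h2 := Set.ncard_insert_le b {x | x ∈ E.map Prod.fst}
  have h3 : ({x | x ∈ E.map Prod.fst} : Set String).ncard = (E.map Prod.fst).toFinset.card := by
    rw [← List.coe_toFinset]; exact Set.ncard_coe_finset (E.map Prod.fst).toFinset
  have h4 := List.toFinset_card_le (E.map Prod.fst)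
  have h5 : (E.map Prod.fst).length = E.length := List.length_map ..
  omega

-- main characterisation of A's recursive search
lemma pvCheckA_main (rulesD : List (PySem.Dict String (List String)))
    (hk : ∀ d ∈ rulesD, (PySem.Dict.keys d).Nodup) :
    ∀ (n : Nat) (b : String) (al : List String), al.Nodup → b ∉ al →
      pvNoCyc (pvEdgesD rulesD) al b → (pvRegion (pvEdgesD rulesD) al b).ncard < n →
      (∃ δ, (pvCheckA rulesD n b al).2 = al ++ δ) ∧
      (pvCheckA rulesD n b al).2.Nodup ∧
      (∀ x, x ∈ (pvCheckA rulesD n b al).2 ↔ x ∈ al ∨ pvAR (pvEdgesD rulesD) al b x) ∧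
      (pvCheckA rulesD n b al).1 = ((pvCheckA rulesD n b al).2.length : Int) - al.length - 1 := by
  intro n
  induction n with
  | zero => intro b al _ _ _ hlt; omega
  | succ m IH =>
    intro b al hnd hnb hcyc hcard
    have FOLD : ∀ (es : List (String × String)), (∀ e ∈ es, e ∈ pvEdgesD rulesD) → ∀ (c : Int) (alc : List String),
        alc.Nodup → b ∉ alc → pvNoCyc (pvEdgesD rulesD) alc b →
        (pvRegion (pvEdgesD rulesD) alc b).ncard < m + 1 →
        (∃ δ, (es.foldl (pvStepA rulesD m b) (c, alc)).2 = alc ++ δ) ∧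
        (es.foldl (pvStepA rulesD m b) (c, alc)).2.Nodup ∧
        b ∉ (es.foldl (pvStepA rulesD m b) (c, alc)).2 ∧
        (∀ x, x ∈ (es.foldl (pvStepA rulesD m b) (c, alc)).2 ↔
          x ∈ alc ∨ ∃ kv ∈ es, kv.2 = b ∧ kv.1 ∉ alc ∧ pvAR (pvEdgesD rulesD) alc kv.1 x) ∧
        (es.foldl (pvStepA rulesD m b) (c, alc)).1 =
          c + (((es.foldl (pvStepA rulesD m b) (c, alc)).2.length : Int) - alc.length) := by
      intro es
      induction es with
      | nil =>
        intro _ c alc hndc hnbc _ _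
        refine ⟨⟨[], by simp⟩, hndc, hnbc, ?_, by simp⟩
        simp
      | cons kv rest ihes =>
        intro hes c alc hndc hnbc hcycc hcardc
        have hkvE : kv ∈ pvEdgesD rulesD := hes kv (List.mem_cons_self ..)
        have hrestE : ∀ e ∈ rest, e ∈ pvEdgesD rulesD := fun e he => hes e (List.mem_cons_of_mem _ he)
        by_cases hvb : kv.2 = b
        · by_cases hmem : kv.1 ∈ alc
          · -- already visited: skipped
            have hhead : pvStepA rulesD m b (c, alc) kv = (c, alc) := by
              simp [pvStepA, hvb, hmem]
            rw [List.foldl_cons, hhead]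
            obtain ⟨hδ, hnd2, hnb2, hmem2, hcnt2⟩ := ihes hrestE c alc hndc hnbc hcycc hcardc
            refine ⟨hδ, hnd2, hnb2, ?_, hcnt2⟩
            intro x
            rw [hmem2 x]
            constructor
            · rintro (h | ⟨kv', h1, h2, h3, h4⟩)
              · exact Or.inl h
              · exact Or.inr ⟨kv', List.mem_cons_of_mem _ h1, h2, h3, h4⟩
            · rintro (h | ⟨kv', h1, h2, h3, h4⟩)
              · exact Or.inl h
              · rcases List.mem_cons.mp h1 with rfl | h1'
                · exact absurd hmem h3
                · exact Or.inr ⟨kv', h1', h2, h3, h4⟩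
          · -- fresh container found: recurse
            have hstepbk : pvStepR (pvEdgesD rulesD) b kv.1 := by
              show (kv.1, b) ∈ pvEdgesD rulesD
              rw [← hvb]
              simpa using hkvE
            have hARbk : pvAR (pvEdgesD rulesD) alc b kv.1 :=
              Relation.ReflTransGen.single ⟨hstepbk, hmem⟩
            have hsubreg : pvRegion (pvEdgesD rulesD) alc kv.1 ⊆ pvRegion (pvEdgesD rulesD) alc b :=
              fun x hx => Relation.ReflTransGen.trans hARbk hx
            have hbnotin : ¬ pvAR (pvEdgesD rulesD) alc kv.1 b :=
              fun hcon => hcycc b Relation.ReflTransGen.refl kv.1 ⟨hstepbk, hmem⟩ hcon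
            have hstrict : pvRegion (pvEdgesD rulesD) alc kv.1 ⊂ pvRegion (pvEdgesD rulesD) alc b :=
              ⟨hsubreg, fun hss => hbnotin (hss Relation.ReflTransGen.refl)⟩
            have hcard1 : (pvRegion (pvEdgesD rulesD) alc kv.1).ncard < m := by
              have := Set.ncard_lt_ncard hstrict (pvRegion_finite ..)
              omega
            have hcyck : pvNoCyc (pvEdgesD rulesD) alc kv.1 :=
              fun x hx p hp hpx => hcycc x (Relation.ReflTransGen.trans hARbk hx) p hp hpx
            obtain ⟨⟨δ1, hδ1⟩, hnd1, hmem1, hcnt1⟩ := IH kv.1 alc hndc hmem hcyck hcard1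
            set r := pvCheckA rulesD m kv.1 alc with hr
            have hsub1 : ∀ a ∈ alc, a ∈ r.2 := fun a ha => (hmem1 a).mpr (Or.inl ha)
            have hb1 : b ∉ r.2 := by
              intro hbin
              rcases (hmem1 b).mp hbin with h | h
              · exact hnbc h
              · exact hbnotin h
            have hnocyc1 : pvNoCyc (pvEdgesD rulesD) r.2 b := by
              intro x hx p hp hpx
              exact hcycc x (pvAR_mono hsub1 hx) p ⟨hp.1, fun h => hp.2 (hsub1 p h)⟩
                (pvAR_mono hsub1 hpx)
            have hcard2 : (pvRegion (pvEdgesD rulesD) r.2 b).ncard < m + 1 := by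
              have hsub2 : pvRegion (pvEdgesD rulesD) r.2 b ⊆ pvRegion (pvEdgesD rulesD) alc b :=
                fun x hx => pvAR_mono hsub1 hx
              have := Set.ncard_le_ncard hsub2 (pvRegion_finite ..)
              omega
            have hhead : pvStepA rulesD m b (c, alc) kv = (c + 1 + r.1, r.2) := by
              simp [pvStepA, hvb, hmem, ← hr]
            rw [List.foldl_cons, hhead]
            obtain ⟨⟨δ2, hδ2⟩, hnd2, hnb2, hmem2, hcnt2⟩ :=
              ihes hrestE (c + 1 + r.1) r.2 hnd1 hb1 hnocyc1 hcard2
            refine ⟨⟨δ1 ++ δ2, by rw [hδ2, hδ1, List.append_assoc]⟩, hnd2, hnb2, ?_, ?_⟩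
            · intro x
              rw [hmem2 x]
              constructor
              · rintro (hx | ⟨kv', h1, h2, h3, h4⟩)
                · rcases (hmem1 x).mp hx with h | h
                  · exact Or.inl h
                  · exact Or.inr ⟨kv, List.mem_cons_self .., hvb, hmem, h⟩
                · exact Or.inr ⟨kv', List.mem_cons_of_mem _ h1, h2,
                    fun hin => h3 (hsub1 _ hin), pvAR_mono hsub1 h4⟩
              · rintro (hx | ⟨kv', h1, h2, h3, h4⟩)
                · exact Or.inl ((hmem1 x).mpr (Or.inl hx))
                · rcases List.mem_cons.mp h1 with rfl | h1'
                  · exact Or.inl ((hmem1 x).mpr (Or.inr h4))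
                  · by_cases hk' : kv'.1 ∈ r.2
                    · rcases (hmem1 kv'.1).mp hk' with h | h
                      · exact absurd h h3
                      · exact Or.inl ((hmem1 x).mpr (Or.inr (Relation.ReflTransGen.trans h h4)))
                    · rcases pvAR_split hsub1 h4 with hgood | ⟨y, hy1, hy2, hy3, hy4⟩
                      · exact Or.inr ⟨kv', h1', h2, hk', hgood⟩
                      · rcases (hmem1 y).mp hy1 with h | h
                        · exact absurd h hy2
                        · exact Or.inl ((hmem1 x).mpr
                            (Or.inr (Relation.ReflTransGen.trans h hy4)))
            · have hlen1 : alc.length ≤ r.2.length := by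
                rw [hδ1]; simp
              rw [hcnt2, hcnt1]
              omega
        · -- value is not the searched bag
          have hhead : pvStepA rulesD m b (c, alc) kv = (c, alc) := by
            simp [pvStepA, hvb]
          rw [List.foldl_cons, hhead]
          obtain ⟨hδ, hnd2, hnb2, hmem2, hcnt2⟩ := ihes hrestE c alc hndc hnbc hcycc hcardc
          refine ⟨hδ, hnd2, hnb2, ?_, hcnt2⟩
          intro x
          rw [hmem2 x]
          constructor
          · rintro (h | ⟨kv', h1, h2, h3, h4⟩)
            · exact Or.inl h
            · exact Or.inr ⟨kv', List.mem_cons_of_mem _ h1, h2, h3, h4⟩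
          · rintro (h | ⟨kv', h1, h2, h3, h4⟩)
            · exact Or.inl h
            · rcases List.mem_cons.mp h1 with rfl | h1'
              · exact absurd h2 hvb
              · exact Or.inr ⟨kv', h1', h2, h3, h4⟩
    -- assemble the n = m+1 case from FOLD over the whole edge list
    rw [pvCheckA_succ rulesD hk m b al]
    obtain ⟨⟨δ, hδ⟩, hndF, hnbF, hmemF, hcntF⟩ :=
      FOLD (pvEdgesD rulesD) (fun e he => he) 0 al hnd hnb hcyc hcard
    set F := (pvEdgesD rulesD).foldl (pvStepA rulesD m b) ((0 : Int), al) with hF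
    refine ⟨⟨δ ++ [b], by rw [hδ, List.append_assoc]⟩, ?_, ?_, ?_⟩
    · simp only [List.nodup_append, List.nodup_cons, List.nodup_nil]
      exact ⟨hndF, by simp, by intro a ha c hc; rw [List.mem_singleton.mp hc]; exact fun h => hnbF (h ▸ ha)⟩
    · intro x
      simp only [List.mem_append, List.mem_singleton]
      rw [hmemF x]
      constructor
      · rintro ((h | ⟨kv', h1, h2, h3, h4⟩) | rfl)
        · exact Or.inl h
        · refine Or.inr (Relation.ReflTransGen.trans ?_ h4)
          refine Relation.ReflTransGen.single ⟨?_, h3⟩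
          show (kv'.1, b) ∈ pvEdgesD rulesD
          rw [← h2]
          simpa using h1
        · exact Or.inr Relation.ReflTransGen.refl
      · rintro (h | hAR)
        · exact Or.inl (Or.inl h)
        · rcases Relation.ReflTransGen.cases_head hAR with rfl | ⟨cc, ⟨hstep, hcal⟩, hrest⟩
          · exact Or.inr rfl
          · exact Or.inl (Or.inr ⟨(cc, b), hstep, rfl, hcal, hrest⟩)
    · have hlenF : al.length ≤ F.2.length := by rw [hδ]; simp
      simp only [List.length_append, List.length_singleton]
      rw [hcntF]
      push_cast
      omega

-- B: the parents dict built by the first loop is exactly pvParents of the edge list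
lemma pvMemParents (E : List (String × String)) (y p : String) :
    p ∈ pvParents E y ↔ (p, y) ∈ E := by
  unfold pvParents
  rw [List.mem_filterMap]
  constructor
  · rintro ⟨⟨a1, a2⟩, ha, hif⟩
    by_cases h2 : a2 = y
    · rw [if_pos h2] at hif
      have h1 : a1 = p := by simpa using hif
      subst h1; subst h2; exact ha
    · simp [h2] at hif
  · intro hpy; exact ⟨(p, y), hpy, by simp⟩

lemma pvFoldModifyGetD (E : List (String × String)) (d : PySem.Dict String (List String)) (v : String) :
    (E.foldl (fun d kv => d.modify kv.2 [] (fun l => l ++ [kv.1])) d).getD v []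
      = d.getD v [] ++ pvParents E v := by
  induction E generalizing d with
  | nil => simp [pvParents]
  | cons kv rest ih =>
    rw [List.foldl_cons, ih]
    rw [PySem.Dict.getD_modify]
    unfold pvParents
    by_cases h : kv.2 = v
    · simp [h]
    · simp [h, Ne.symm h]

lemma pvBuildParents_getD (rulesD : List (PySem.Dict String (List String))) (v : String) :
    (pvBuildParents rulesD).getD v [] = pvParents (pvEdgesD rulesD) v := by
  unfold pvBuildParents
  have h1 : ∀ (a : PySem.Dict String (List String)) (rule : PySem.Dict String (List String)),
      rule.items.foldl (fun d kv => kv.2.foldl (fun d v => d.modify v [] (fun l => l ++ [kv.1])) d) a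
        = (rule.items.flatMap (fun kv => kv.2.map (fun v => (kv.1, v)))).foldl
            (fun d kv => d.modify kv.2 [] (fun l => l ++ [kv.1])) a := by
    intro a rule
    exact pvFoldItemsFlat rule.items (fun d kv => d.modify kv.2 [] (fun l => l ++ [kv.1])) a
  rw [PySem.List.foldl_congr_mem rulesD _
    (fun a d => (d.items.flatMap (fun kv => kv.2.map (fun v => (kv.1, v)))).foldl
      (fun d kv => d.modify kv.2 [] (fun l => l ++ [kv.1])) a) _ (fun acc d _ => h1 acc d)]
  rw [pvFoldRulesFlat]
  rw [pvFoldModifyGetD]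
  simp [PySem.Dict.getD_empty]

lemma pvFilterAddLength (U : List String) (hU : U.Nodup) (s1 : List String) (p : String)
    (hpU : p ∈ U) (hpn : p ∉ s1) :
    (U.filter (fun u => u ∉ PySem.Set.add s1 p)).length + 1
      = (U.filter (fun u => u ∉ s1)).length := by
  induction U with
  | nil => exact absurd hpU (List.not_mem_nil)
  | cons a U' ihU =>
    have hU' : U'.Nodup := hU.of_cons
    have haU' : a ∉ U' := (List.nodup_cons.mp hU).1
    by_cases hap : a = p
    · subst hap
      have hd1 : (decide (a ∉ PySem.Set.add s1 a)) = false := by simp [PySem.Set.mem_add]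
      have hd2 : (decide (a ∉ s1)) = true := by simpa using hpn
      rw [List.filter_cons, List.filter_cons, hd1, hd2]
      simp only [if_false, if_true, Bool.false_eq_true, List.length_cons]
      have hcong : U'.filter (fun u => u ∉ PySem.Set.add s1 a)
          = U'.filter (fun u => u ∉ s1) := by
        apply List.filter_congr
        intro u hu
        have hua : u ≠ a := fun h => haU' (h ▸ hu)
        simp [PySem.Set.mem_add, hua]
      rw [hcong]
    · have hpU' : p ∈ U' := by
        rcases List.mem_cons.mp hpU with h | h
        · exact absurd h.symm hap
        · exact h
      rw [List.filter_cons, List.filter_cons]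
      by_cases has : a ∈ s1
      · have hd1 : (decide (a ∉ PySem.Set.add s1 p)) = false := by
          simp [PySem.Set.mem_add, has]
        have hd2 : (decide (a ∉ s1)) = false := by simpa using has
        rw [hd1, hd2]
        simp only [Bool.false_eq_true, if_false]
        exact ihU hU' hpU'
      · have hd1 : (decide (a ∉ PySem.Set.add s1 p)) = true := by
          simp [PySem.Set.mem_add, has, hap]
        have hd2 : (decide (a ∉ s1)) = true := by simpa using has
        rw [hd1, hd2]
        simp only [if_true, List.length_cons]
        have := ihU hU' hpU'
        omega

-- B: the worklist loop
lemma pvLoopB_main (E : List (String × String)) (parents : PySem.Dict String (List String))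
    (hpa : ∀ v, parents.getD v [] = pvParents E v) (b : String) :
    ∀ (n : Nat) (seen stack : List String), seen.Nodup →
      (∀ x ∈ seen, x ∈ (E.map Prod.fst).dedup) →
      stack.length + ((E.map Prod.fst).dedup.filter (fun u => u ∉ seen)).length ≤ n →
      (∀ x ∈ seen, Relation.TransGen (pvStepR E) b x) →
      (∀ x ∈ stack, Relation.ReflTransGen (pvStepR E) b x) →
      (∀ x ∈ stack, x = b ∨ x ∈ seen) →
      (∀ x, (x = b ∨ x ∈ seen) → x ∉ stack → ∀ p ∈ pvParents E x, p ∈ seen) →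
      (pvLoopB parents n seen stack).Nodup ∧
      (∀ x ∈ seen, x ∈ pvLoopB parents n seen stack) ∧
      (∀ x ∈ pvLoopB parents n seen stack, Relation.TransGen (pvStepR E) b x) ∧
      (∀ x, (x = b ∨ x ∈ pvLoopB parents n seen stack) → ∀ p ∈ pvParents E x, p ∈ pvLoopB parents n seen stack) := by
  intro n
  induction n with
  | zero =>
    intro seen stack hnd hU hfuel hseenTG hstackR hstackS hfront
    have hstack : stack = [] := by
      rcases stack with _ | ⟨z, zs⟩
      · rfl
      · simp at hfuel
    subst hstack
    exact ⟨hnd, fun x hx => hx, hseenTG, fun x hx p hp => hfront x hx (by simp) p hp⟩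
  | succ m IHn =>
    intro seen stack hnd hU hfuel hseenTG hstackR hstackS hfront
    rcases List.eq_nil_or_concat stack with rfl | ⟨ys, y, hstack⟩
    · have heval : pvLoopB parents (m+1) seen [] = seen := by
        simp [pvLoopB, PySem.List.pop?]
      rw [heval]
      exact ⟨hnd, fun x hx => hx, hseenTG, fun x hx p hp => hfront x hx (by simp) p hp⟩
    · rw [List.concat_eq_append] at hstack
      subst hstack
      have hyR : Relation.ReflTransGen (pvStepR E) b y := hstackR y (by simp)
      have heval : pvLoopB parents (m+1) seen (ys ++ [y]) =
          pvLoopB parents m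
            ((parents.getD y []).foldl (fun st p =>
              if p ∈ st.1 then st else (PySem.Set.add st.1 p, st.2 ++ [p])) (seen, ys)).1
            ((parents.getD y []).foldl (fun st p =>
              if p ∈ st.1 then st else (PySem.Set.add st.1 p, st.2 ++ [p])) (seen, ys)).2 := by
        simp only [pvLoopB, PySem.List.pop?_last]
      have INNER : ∀ (ps : List String), (∀ p ∈ ps, (p, y) ∈ E) → ∀ (s1 st1 : List String),
          s1.Nodup → (∀ x ∈ s1, x ∈ (E.map Prod.fst).dedup) →
          (∀ x ∈ s1, Relation.TransGen (pvStepR E) b x) →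
          (∀ x ∈ st1, Relation.ReflTransGen (pvStepR E) b x) →
          (∀ x ∈ st1, x = b ∨ x ∈ s1) →
          (ps.foldl (fun st p => if p ∈ st.1 then st
              else (PySem.Set.add st.1 p, st.2 ++ [p])) (s1, st1)).1.Nodup ∧
          (∀ x ∈ (ps.foldl (fun st p => if p ∈ st.1 then st
              else (PySem.Set.add st.1 p, st.2 ++ [p])) (s1, st1)).1, x ∈ (E.map Prod.fst).dedup) ∧
          (∀ x ∈ (ps.foldl (fun st p => if p ∈ st.1 then st
              else (PySem.Set.add st.1 p, st.2 ++ [p])) (s1, st1)).1, Relation.TransGen (pvStepR E) b x) ∧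
          (∀ x ∈ (ps.foldl (fun st p => if p ∈ st.1 then st
              else (PySem.Set.add st.1 p, st.2 ++ [p])) (s1, st1)).2, Relation.ReflTransGen (pvStepR E) b x) ∧
          (∀ x ∈ (ps.foldl (fun st p => if p ∈ st.1 then st
              else (PySem.Set.add st.1 p, st.2 ++ [p])) (s1, st1)).2, x = b ∨ x ∈ (ps.foldl (fun st p => if p ∈ st.1 then st
              else (PySem.Set.add st.1 p, st.2 ++ [p])) (s1, st1)).1) ∧
          (∀ x ∈ s1, x ∈ (ps.foldl (fun st p => if p ∈ st.1 then st
              else (PySem.Set.add st.1 p, st.2 ++ [p])) (s1, st1)).1) ∧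
          (∃ δ, (ps.foldl (fun st p => if p ∈ st.1 then st
              else (PySem.Set.add st.1 p, st.2 ++ [p])) (s1, st1)).2 = st1 ++ δ) ∧
          (∀ p ∈ ps, p ∈ (ps.foldl (fun st p => if p ∈ st.1 then st
              else (PySem.Set.add st.1 p, st.2 ++ [p])) (s1, st1)).1) ∧
          (∀ x ∈ (ps.foldl (fun st p => if p ∈ st.1 then st
              else (PySem.Set.add st.1 p, st.2 ++ [p])) (s1, st1)).1, x ∈ s1 ∨ x ∈ (ps.foldl (fun st p => if p ∈ st.1 then st
              else (PySem.Set.add st.1 p, st.2 ++ [p])) (s1, st1)).2) ∧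
          ((ps.foldl (fun st p => if p ∈ st.1 then st
              else (PySem.Set.add st.1 p, st.2 ++ [p])) (s1, st1)).2.length +
            ((E.map Prod.fst).dedup.filter (fun u => u ∉ (ps.foldl (fun st p => if p ∈ st.1 then st
              else (PySem.Set.add st.1 p, st.2 ++ [p])) (s1, st1)).1)).length ≤
            st1.length + ((E.map Prod.fst).dedup.filter (fun u => u ∉ s1)).length) := by
        intro ps
        induction ps with
        | nil =>
          intro _ s1 st1 h1 h2 h3 h4 h5
          exact ⟨h1, h2, h3, h4, fun x hx => h5 x hx, fun x hx => hx, ⟨[], by simp⟩,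
            fun p hp => absurd hp (List.not_mem_nil), fun x hx => Or.inl hx, le_refl _⟩
        | cons p ps' ihp =>
          intro hps s1 st1 h1 h2 h3 h4 h5
          have hpE : (p, y) ∈ E := hps p (List.mem_cons_self ..)
          have hps' : ∀ q ∈ ps', (q, y) ∈ E := fun q hq => hps q (List.mem_cons_of_mem _ hq)
          rw [List.foldl_cons]
          by_cases hpin : p ∈ s1
          · rw [if_pos hpin]
            obtain ⟨c1, c2, c3, c4, c5, c6, c7, c8, c9, c10⟩ := ihp hps' s1 st1 h1 h2 h3 h4 h5
            refine ⟨c1, c2, c3, c4, c5, c6, c7, ?_, c9, c10⟩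
            rintro q hq
            rcases List.mem_cons.mp hq with h | hq'
            · rw [h]; exact c6 p hpin
            · exact c8 q hq'
          · rw [if_neg hpin]
            simp only [show ((s1, st1).1.add p, (s1, st1).2 ++ [p])
              = (PySem.Set.add s1 p, st1 ++ [p]) from rfl]
            have hpU : p ∈ (E.map Prod.fst).dedup :=
              List.mem_dedup.mpr (List.mem_map.mpr ⟨(p, y), hpE, rfl⟩)
            have hpTG : Relation.TransGen (pvStepR E) b p :=
              Relation.TransGen.tail' hyR hpE
            have h1' : (PySem.Set.add s1 p).Nodup := PySem.Set.nodup_add s1 p h1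
            have h2' : ∀ x ∈ PySem.Set.add s1 p, x ∈ (E.map Prod.fst).dedup := by
              intro x hx
              rcases (PySem.Set.mem_add s1 p x).mp hx with h | rfl
              · exact h2 x h
              · exact hpU
            have h3' : ∀ x ∈ PySem.Set.add s1 p, Relation.TransGen (pvStepR E) b x := by
              intro x hx
              rcases (PySem.Set.mem_add s1 p x).mp hx with h | rfl
              · exact h3 x h
              · exact hpTG
            have h4' : ∀ x ∈ st1 ++ [p], Relation.ReflTransGen (pvStepR E) b x := by
              intro x hx
              rcases List.mem_append.mp hx with h | h
              · exact h4 x h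
              · rw [List.mem_singleton.mp h]
                exact hpTG.to_reflTransGen
            have h5' : ∀ x ∈ st1 ++ [p], x = b ∨ x ∈ PySem.Set.add s1 p := by
              intro x hx
              rcases List.mem_append.mp hx with h | h
              · rcases h5 x h with h' | h'
                · exact Or.inl h'
                · exact Or.inr ((PySem.Set.mem_add s1 p x).mpr (Or.inl h'))
              · exact Or.inr ((PySem.Set.mem_add s1 p x).mpr (Or.inr (List.mem_singleton.mp h)))
            obtain ⟨c1, c2, c3, c4, c5, c6, c7, c8, c9, c10⟩ :=
              ihp hps' (PySem.Set.add s1 p) (st1 ++ [p]) h1' h2' h3' h4' h5'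
            refine ⟨c1, c2, c3, c4, c5, ?_, ?_, ?_, ?_, ?_⟩
            · intro x hx
              exact c6 x ((PySem.Set.mem_add s1 p x).mpr (Or.inl hx))
            · obtain ⟨δ, hδ⟩ := c7
              exact ⟨p :: δ, by rw [hδ, List.append_assoc]; rfl⟩
            · intro q hq
              rcases List.mem_cons.mp hq with h | hq'
              · rw [h]; exact c6 p ((PySem.Set.mem_add s1 p p).mpr (Or.inr rfl))
              · exact c8 q hq'
            · intro x hx
              rcases c9 x hx with h | h
              · rcases (PySem.Set.mem_add s1 p x).mp h with h' | rfl
                · exact Or.inl h'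
                · obtain ⟨δ, hδ⟩ := c7
                  exact Or.inr (by rw [hδ]; simp)
              · exact Or.inr h
            · have hstep := pvFilterAddLength (E.map Prod.fst).dedup (List.nodup_dedup ..)
                s1 p hpU hpin
              have hl : (st1 ++ [p]).length = st1.length + 1 := by simp
              omega
      obtain ⟨c1, c2, c3, c4, c5, c6, c7, c8, c9, c10⟩ :=
        INNER (parents.getD y []) (by
            intro p hp
            rw [hpa y] at hp
            exact (pvMemParents E y p).mp hp)
          seen ys hnd hU hseenTG (fun x hx => hstackR x (by simp [hx]))
          (fun x hx => hstackS x (by simp [hx]))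
      rw [heval]
      set st := (parents.getD y []).foldl (fun st p =>
        if p ∈ st.1 then st else (PySem.Set.add st.1 p, st.2 ++ [p])) (seen, ys) with hst
      have hfuel2 : st.2.length + ((E.map Prod.fst).dedup.filter (fun u => u ∉ st.1)).length ≤ m := by
        have : (ys ++ [y]).length = ys.length + 1 := by simp
        omega
      have hfront2 : ∀ x, (x = b ∨ x ∈ st.1) → x ∉ st.2 → ∀ p ∈ pvParents E x, p ∈ st.1 := by
        intro x hx hnin p hp
        by_cases hxy : x = y
        · subst hxy
          exact c8 p (by rw [hpa x]; exact hp)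
        · have hxold : x = b ∨ x ∈ seen := by
            rcases hx with rfl | hxs
            · exact Or.inl rfl
            · rcases c9 x hxs with h | h
              · exact Or.inr h
              · exact absurd h hnin
          have hxnotstack : x ∉ ys ++ [y] := by
            intro hxin
            rcases List.mem_append.mp hxin with h | h
            · obtain ⟨δ, hδ⟩ := c7
              exact hnin (by rw [hδ]; exact List.mem_append.mpr (Or.inl h))
            · exact hxy (List.mem_singleton.mp h)
          exact c6 p (hfront x hxold hxnotstack p hp)
      obtain ⟨d1, d2, d3, d4⟩ := IHn st.1 st.2 c1 c2 hfuel2 c3 c4 c5 hfront2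
      exact ⟨d1, fun x hx => d2 x (c6 x hx), d3, d4⟩

-- Pre_'s bounded closure is exactly reflexive-transitive reachability
lemma mem_pvGrow (E : List (String × String)) (T : List String) (x : String) :
    x ∈ pvGrow E T ↔ x ∈ T ∨ ∃ y ∈ T, (x, y) ∈ E := by
  unfold pvGrow
  rw [PySem.Set.mem_update, List.mem_flatMap]
  simp only [pvMemParents]

lemma pvGrow_length_lt (E : List (String × String)) (T : List String)
    (h : pvGrow E T ≠ T) : T.length < (pvGrow E T).length := by
  have he : pvGrow E T = T ++ (PySem.Set.ofList (T.flatMap (pvParents E))).filter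
      (fun y => !(PySem.Set.contains T y)) := PySem.Set.update_eq_append_filter _ _
  rw [he] at h ⊢
  rcases List.eq_nil_or_concat ((PySem.Set.ofList (T.flatMap (pvParents E))).filter
      (fun y => !(PySem.Set.contains T y))) with hnil | ⟨_, _, hcc⟩
  · rw [hnil] at h; simp at h
  · rw [hcc]; simp

lemma nodup_iterate_pvGrow (E : List (String × String)) (T : List String) (hT : T.Nodup) (n : Nat) :
    ((pvGrow E)^[n] T).Nodup := by
  induction n generalizing T with
  | zero => exact hT
  | succ k ih => rw [Function.iterate_succ_apply]; exact ih _ (PySem.Set.nodup_update T _ hT)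

lemma iterate_pvGrow_subset (E : List (String × String)) (T : List String) (n : Nat) :
    ∀ x ∈ (pvGrow E)^[n] T, x ∈ T ∨ x ∈ E.map Prod.fst := by
  induction n generalizing T with
  | zero => exact fun x hx => Or.inl hx
  | succ k ih =>
    intro x hx
    rw [Function.iterate_succ_apply] at hx
    rcases ih _ x hx with h | h
    · rcases (mem_pvGrow E T x).mp h with h' | ⟨y, _, hy⟩
      · exact Or.inl h'
      · exact Or.inr (List.mem_map.mpr ⟨(x, y), hy, rfl⟩)
    · exact Or.inr h

lemma mem_iterate_pvGrow_of_mem (E : List (String × String)) (T : List String) (n : Nat) :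
    ∀ x ∈ T, x ∈ (pvGrow E)^[n] T := by
  induction n generalizing T with
  | zero => exact fun x hx => hx
  | succ k ih =>
    intro x hx
    rw [Function.iterate_succ_apply]
    exact ih _ x ((mem_pvGrow E T x).mpr (Or.inl hx))

lemma pvClosure_closed (E : List (String × String)) (S : List String) :
    pvGrow E (pvClosure E S) = pvClosure E S := by
  set g := pvGrow E with hg
  set S₀ := PySem.Set.ofList S with hS₀
  by_cases hfix : ∃ j, j ≤ E.length + 1 ∧ g (g^[j] S₀) = g^[j] S₀
  · obtain ⟨j, hj, hfx⟩ := hfix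
    have hiter : ∀ m, g^[m] (g^[j] S₀) = g^[j] S₀ := fun m => Function.iterate_fixed hfx m
    have hcl : pvClosure E S = g^[j] S₀ := by
      unfold pvClosure
      rw [← hg, ← hS₀, ← hiter (E.length + 1 - j)]
      rw [← Function.iterate_add_apply]
      congr 1
      omega
    rw [hcl, hfx]
  · exfalso
    push Not at hfix
    have grow : ∀ i, i ≤ E.length + 2 → S₀.length + i ≤ (g^[i] S₀).length := by
      intro i
      induction i with
      | zero => simp
      | succ k ih =>
        intro hk
        have h1 := ih (by omega)
        have hne := hfix k (by omega)
        have h2 := pvGrow_length_lt E (g^[k] S₀) hne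
        rw [← hg] at h2
        rw [Function.iterate_succ_apply']
        omega
    have hbig := grow (E.length + 2) (le_refl _)
    have hnd : ((g^[E.length + 2]) S₀).Nodup :=
      nodup_iterate_pvGrow E S₀ (PySem.Set.nodup_ofList S) _
    have hsub := iterate_pvGrow_subset E S₀ (E.length + 2)
    have hlen : ((g^[E.length + 2]) S₀).length ≤ S₀.length + E.length := by
      have h1 : ((g^[E.length + 2]) S₀).toFinset ⊆ S₀.toFinset ∪ (E.map Prod.fst).toFinset := by
        intro x hx
        rw [List.mem_toFinset] at hx
        rcases hsub x hx with h | h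
        · exact Finset.mem_union_left _ (List.mem_toFinset.mpr h)
        · exact Finset.mem_union_right _ (List.mem_toFinset.mpr h)
      have h2 := Finset.card_le_card h1
      have h3 := Finset.card_union_le S₀.toFinset (E.map Prod.fst).toFinset
      have h4 : ((g^[E.length + 2]) S₀).toFinset.card = ((g^[E.length + 2]) S₀).length :=
        List.toFinset_card_of_nodup hnd
      have h5 : S₀.toFinset.card = S₀.length := List.toFinset_card_of_nodup (PySem.Set.nodup_ofList S)
      have h6 := List.toFinset_card_le (E.map Prod.fst)
      have h7 : (E.map Prod.fst).length = E.length := List.length_map ..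
      omega
    omega

lemma mem_pvClosure (E : List (String × String)) (S : List String) (x : String) :
    x ∈ pvClosure E S ↔ ∃ s ∈ S, Relation.ReflTransGen (pvStepR E) s x := by
  constructor
  · have main : ∀ n x, x ∈ (pvGrow E)^[n] (PySem.Set.ofList S) →
        ∃ s ∈ S, Relation.ReflTransGen (pvStepR E) s x := by
      intro n
      induction n with
      | zero => exact fun x hx => ⟨x, (PySem.Set.mem_ofList S x).mp hx, .refl⟩
      | succ k ih =>
        intro x hx
        rw [Function.iterate_succ_apply'] at hx
        rcases (mem_pvGrow E _ x).mp hx with h | ⟨y, hy, hxy⟩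
        · exact ih x h
        · obtain ⟨s, hs, hreach⟩ := ih y hy
          exact ⟨s, hs, hreach.tail hxy⟩
    exact main _ x
  · rintro ⟨s, hs, hreach⟩
    induction hreach with
    | refl =>
      exact mem_iterate_pvGrow_of_mem E _ _ s ((PySem.Set.mem_ofList S s).mpr hs)
    | tail hr hstep ih =>
      have := pvClosure_closed E S
      rw [← this]
      rename_i c _
      exact (mem_pvGrow E _ _).mpr (Or.inr ⟨c, ih, hstep⟩)

lemma pvAR_nil (E : List (String × String)) (u v : String) :
    pvAR E [] u v ↔ Relation.ReflTransGen (pvStepR E) u v :=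
  ⟨Relation.ReflTransGen.mono (fun _ _ h => h.1),
   Relation.ReflTransGen.mono (fun _ _ h => ⟨h, by simp⟩)⟩

-- ===== VERDICT (by name: the statement is the Claim_ definition above) =====
theorem part1_spec : Claim_equal_part1 := by
  unfold Claim_equal_part1
  intro b rules _ hpre
  unfold Spec_part1 part1 part1_alt
  simp only [show (PySem.Set.empty : PySem.Set String) = ([] : List String) from rfl]
  have hEeq : pvEdgesD (rules.map PySem.Dict.ofList) = pvEdges rules := rfl
  have hk : ∀ d ∈ rules.map PySem.Dict.ofList, (PySem.Dict.keys d).Nodup := by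
    intro d hd
    obtain ⟨r, _, rfl⟩ := List.mem_map.mp hd
    exact PySem.Dict.nodup_keys_ofList r
  -- Pre_ gives: no containment cycle is reachable from b
  have hnocyc : pvNoCyc (pvEdges rules) [] b := by
    intro x hARx p hp hARpx
    have hRx : Relation.ReflTransGen (pvStepR (pvEdges rules)) b x := (pvAR_nil ..).mp hARx
    have hRpx : Relation.ReflTransGen (pvStepR (pvEdges rules)) p x := (pvAR_nil ..).mp hARpx
    have hxin : x ∈ pvClosure (pvEdges rules) [b] :=
      (mem_pvClosure ..).mpr ⟨b, by simp, hRx⟩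
    exact hpre x hxin ((mem_pvClosure ..).mpr ⟨p, (pvMemParents ..).mpr hp.1, hRpx⟩)
  have hnoTGbb : ¬ Relation.TransGen (pvStepR (pvEdges rules)) b b := by
    intro hTG
    obtain ⟨c, hstep, hrest⟩ := Relation.TransGen.head'_iff.mp hTG
    exact hnocyc b Relation.ReflTransGen.refl c ⟨hstep, by simp⟩ ((pvAR_nil ..).mpr hrest)
  -- A's recursion
  have hcard : (pvRegion (pvEdgesD (rules.map PySem.Dict.ofList)) [] b).ncard
      < (pvEdges rules).length + 2 := by
    have := pvRegion_ncard_le (pvEdgesD (rules.map PySem.Dict.ofList)) [] b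
    have hlenE : (pvEdgesD (rules.map PySem.Dict.ofList)).length = (pvEdges rules).length := rfl
    omega
  obtain ⟨⟨δA, hδA⟩, hndA, hmemA, hcntA⟩ :=
    pvCheckA_main (rules.map PySem.Dict.ofList) hk ((pvEdges rules).length + 2) b []
      List.nodup_nil (by simp) (by rw [hEeq]; exact hnocyc) hcard
  -- B's index and worklist
  have hpa : ∀ v, (pvBuildParents (rules.map PySem.Dict.ofList)).getD v []
      = pvParents (pvEdges rules) v := by
    intro v
    rw [pvBuildParents_getD, hEeq]
  have hfuel : ([b] : List String).length +
      (((pvEdges rules).map Prod.fst).dedup.filter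
        (fun u => u ∉ ([] : List String))).length ≤ (pvEdges rules).length + 1 := by
    have h1 : ((pvEdges rules).map Prod.fst).dedup.length ≤ ((pvEdges rules).map Prod.fst).length :=
      List.Sublist.length_le (List.dedup_sublist _)
    have h2 := List.length_filter_le (fun u => decide (u ∉ ([] : List String)))
      ((pvEdges rules).map Prod.fst).dedup
    have h3 : ((pvEdges rules).map Prod.fst).length = (pvEdges rules).length := List.length_map ..
    simp only [List.length_singleton]
    omega
  obtain ⟨d1, d2, d3, d4⟩ :=
    pvLoopB_main (pvEdges rules) (pvBuildParents (rules.map PySem.Dict.ofList)) hpa b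
      ((pvEdges rules).length + 1) [] [b] List.nodup_nil (by simp) hfuel (by simp)
      (by intro x hx; rw [List.mem_singleton.mp hx])
      (fun x hx => Or.inl (List.mem_singleton.mp hx))
      (by
        intro x hx hnin p hp
        rcases hx with rfl | hx'
        · exact absurd (List.mem_singleton.mpr rfl) hnin
        · exact absurd hx' (List.not_mem_nil))
  set seenF := pvLoopB (pvBuildParents (rules.map PySem.Dict.ofList))
    ((pvEdges rules).length + 1) [] [b] with hseenF
  have hbnot : b ∉ seenF := fun hbin => hnoTGbb (d3 b hbin)
  have hcomp : ∀ x, Relation.ReflTransGen (pvStepR (pvEdges rules)) b x → x = b ∨ x ∈ seenF := by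
    intro x h
    induction h with
    | refl => exact Or.inl rfl
    | tail hr hstep ih =>
      rename_i c x'
      refine Or.inr (d4 c ?_ x' ((pvMemParents ..).mpr hstep))
      rcases ih with rfl | h'
      · exact Or.inl rfl
      · exact Or.inr h'
  have hTGiff : ∀ x, Relation.TransGen (pvStepR (pvEdges rules)) b x ↔ x ∈ seenF := by
    intro x
    constructor
    · intro hTG
      rcases hcomp x hTG.to_reflTransGen with rfl | h
      · exact absurd hTG hnoTGbb
      · exact h
    · exact d3 x
  -- the two visited collections have the same members
  have hmemEq : ∀ x, x ∈ (pvCheckA (rules.map PySem.Dict.ofList)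
      ((pvEdges rules).length + 2) b []).2 ↔ x ∈ b :: seenF := by
    intro x
    rw [hmemA x, List.mem_cons]
    constructor
    · rintro (h | h)
      · exact absurd h (List.not_mem_nil)
      · rw [hEeq] at h
        rcases Relation.reflTransGen_iff_eq_or_transGen.mp ((pvAR_nil ..).mp h) with rfl | hTG
        · exact Or.inl rfl
        · exact Or.inr ((hTGiff x).mp hTG)
    · rintro (rfl | h)
      · exact Or.inr (by rw [hEeq]; exact Relation.ReflTransGen.refl)
      · refine Or.inr ?_
        rw [hEeq]
        exact (pvAR_nil ..).mpr ((hTGiff x).mpr h).to_reflTransGen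
  have hndB : (b :: seenF).Nodup := List.nodup_cons.mpr ⟨hbnot, d1⟩
  have hlen : (pvCheckA (rules.map PySem.Dict.ofList)
      ((pvEdges rules).length + 2) b []).2.length = seenF.length + 1 := by
    have hfin : (pvCheckA (rules.map PySem.Dict.ofList)
        ((pvEdges rules).length + 2) b []).2.toFinset = (b :: seenF).toFinset := by
      apply Finset.ext
      intro x
      rw [List.mem_toFinset, List.mem_toFinset]
      exact hmemEq x
    have h1 := List.toFinset_card_of_nodup hndA
    have h2 := List.toFinset_card_of_nodup hndB
    rw [hfin] at h1
    simp only [List.length_cons] at h2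
    omega
  rw [hcntA, hlen]
  simp only [List.length_nil]
  push_cast
  omega
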